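-- pv_equiv track=rewrite | github.com/tomasz-pilawa/prestashop_api | editing.py | truncate_meta
-- ===== SOURCE A (Python) =====
-- def truncate_meta(text, max_length=160):
--
--     sentences = text.split('. ')
--     output = sentences[0] + '. '
--
--     remaining_length = max_length - len(output)
--     remaining_sentences = sorted(sentences[1:], key=len, reverse=True)
--
--     for sentence in remaining_sentences:
--         sentence_length = len(sentence) + 2
--         if sentence_length <= remaining_length:
--             output += sentence
--             remaining_length -= sentence_length
--         else:
--             break
--
--     return output.strip()
-- ===== SOURCE B (Python) =====
-- def truncate_meta(text, max_length=160):
--     # selection-based greedy: no sort; repeatedly pick the longest remaining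
--     # sentence (max with key=len, ties -> earliest) while it still fits
--     sentences = text.split('. ')
--     output = sentences[0] + '. '
--     budget = max_length - len(output)
--     pool = sentences[1:]
--     picked = []
--     while pool:
--         best = max(pool, key=len)
--         cost = len(best) + 2
--         if budget < cost:
--             break
--         picked.append(best)
--         budget -= cost
--         pool.remove(best)
--     return (output + ''.join(picked)).strip()
-- ===== Notes on version B (the rewrite author's own statement) =====
-- stated objective: alternative
-- what changed: Replaces A's sort-then-scan-with-break (sort all tail sentences by length descending, then consume a prefix) by a sort-free selection greedy: repeatedly pick the longest remaining sentence with max(key=len) and remove it from the pool, stopping when the longest no longer fits; correct because the stable descending sort is exactly repeated first-max extraction.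
import Mathlib
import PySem

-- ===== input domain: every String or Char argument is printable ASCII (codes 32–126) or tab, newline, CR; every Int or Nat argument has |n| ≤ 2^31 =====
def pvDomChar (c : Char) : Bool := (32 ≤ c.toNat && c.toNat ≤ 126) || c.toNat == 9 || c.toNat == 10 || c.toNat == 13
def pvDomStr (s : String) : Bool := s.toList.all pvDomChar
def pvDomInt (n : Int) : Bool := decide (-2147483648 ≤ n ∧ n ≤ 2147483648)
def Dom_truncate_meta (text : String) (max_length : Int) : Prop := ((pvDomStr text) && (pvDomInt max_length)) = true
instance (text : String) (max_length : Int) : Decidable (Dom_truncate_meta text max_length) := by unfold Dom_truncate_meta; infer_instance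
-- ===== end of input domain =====

-- B replaces A's sort-then-scan greedy by a sort-free selection greedy (repeated
-- first-max extraction); objective: alternative algorithm, same results.

-- ===== PORT A =====
-- the for-loop with break: consume sorted sentences while they fit, stop at the first that doesn't
def pvLoopA : List (List Char) → List Char → Int → List Char
  | [], output, _ => output
  | s :: rest, output, remaining =>
      let slen := PySem.Chars.len s + 2
      if slen ≤ remaining then pvLoopA rest (output ++ s) (remaining - slen)
      else output

def truncate_meta (text : String) (max_length : Int) : String :=
  let sentences := PySem.Chars.splitOn text.toList ['.', ' ']
  let output := PySem.List.pyGetD sentences 0 [] ++ ['.', ' ']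
  let remaining_length := max_length - PySem.Chars.len output
  let remaining_sentences :=
    PySem.List.sorted (PySem.List.slice sentences (some 1) none) (fun s => PySem.Chars.len s) true
  String.ofList (PySem.Chars.strip (pvLoopA remaining_sentences output remaining_length))

-- ===== PORT B =====
-- Source B's while-loop: pick the longest remaining sentence (max, key=len; first on ties),
-- stop when it no longer fits, else append it to picked and remove it from the pool
def pvSelB (pool : List (List Char)) (picked : List (List Char)) (budget : Int) :
    List (List Char) :=
  match PySem.List.max? pool (fun s => PySem.Chars.len s) with
  | none => picked
  | some best =>
      let cost := PySem.Chars.len best + 2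
      if budget < cost then picked
      else
        match hr : PySem.List.remove? pool best with
        | none => picked      -- unreachable: best is in pool
        | some pool' => pvSelB pool' (picked ++ [best]) (budget - cost)
termination_by pool.length
decreasing_by
  have hb : best ∈ pool := by
    by_contra h
    rw [(PySem.List.remove?_eq_none_iff pool best).2 h] at hr
    simp at hr
  have h2 := List.length_erase_of_mem hb
  have h3 : 0 < pool.length := List.length_pos_of_mem hb
  rw [PySem.List.remove?_eq_some_erase pool best hb] at hr
  cases hr
  omega

def truncate_meta_alt (text : String) (max_length : Int) : String :=
  let sentences := PySem.Chars.splitOn text.toList ['.', ' ']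
  let output := PySem.List.pyGetD sentences 0 [] ++ ['.', ' ']
  let budget := max_length - PySem.Chars.len output
  let pool := PySem.List.slice sentences (some 1) none
  let picked := pvSelB pool [] budget
  String.ofList (PySem.Chars.strip (output ++ PySem.Chars.join [] picked))

-- ===== PRECONDITION & SPEC =====
def Spec_truncate_meta (text : String) (max_length : Int) (out : String) : Prop := out = truncate_meta_alt text max_length
instance (text : String) (max_length : Int) (out : String) : Decidable (Spec_truncate_meta text max_length out) := by unfold Spec_truncate_meta; infer_instance

-- ===== CLAIM (what is proved, stated in full; the proofs are below) =====
def Claim_equal_truncate_meta : Prop := ∀ (text : String) (max_length : Int), Dom_truncate_meta text max_length → Spec_truncate_meta text max_length (truncate_meta text max_length)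

-- ===== LEMMAS AND PROOFS =====

-- max? over an appended element is one fold step
theorem max?_append_singleton {α κ : Type} [LT κ] [DecidableLT κ]
    (ys : List α) (x : α) (key : α → κ) :
    PySem.List.max? (ys ++ [x]) key =
      (match PySem.List.max? ys key with
       | none => some x
       | some m => if key m < key x then some x else some m) := by
  simp only [PySem.List.max?, List.foldl_append, List.foldl_cons, List.foldl_nil]
  rfl

-- stability: the stable descending sort is first-max extraction
theorem sorted_rev_eq_max_cons {α : Type} [BEq α] [LawfulBEq α]
    (key : α → Int) (xs : List α) (m : α)
    (hm : PySem.List.max? xs key = some m) :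
    PySem.List.sorted xs key true = m :: PySem.List.sorted (xs.erase m) key true := by
  induction xs using List.reverseRecOn with
  | nil => simp [PySem.List.max?] at hm
  | append_singleton ys x ih =>
      rw [max?_append_singleton] at hm
      rw [PySem.List.sorted_rev_eq_foldl_insertBy, List.foldl_append,
        ← PySem.List.sorted_rev_eq_foldl_insertBy]
      cases hys : PySem.List.max? ys key with
      | none =>
          -- ys = [] : max? = none means fold over ys stayed none, so ys = []
          have hnil : ys = [] := by
            cases ys with
            | nil => rfl
            | cons a t =>
                exfalso
                have : (PySem.List.max? (a :: t) key).isSome := by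
                  have : a ∈ a :: t := by simp
                  cases h : PySem.List.max? (a :: t) key with
                  | none => simp [PySem.List.max?_eq_none_iff] at h
                  | some _ => simp
                rw [hys] at this; simp at this
          subst hnil
          simp [hys] at hm
          subst hm
          simp [PySem.List.sorted, PySem.List.insertBy]
      | some my =>
          rw [hys] at hm
          by_cases hlt : key my < key x
          · -- new element is the strict max: inserted at the front, and erase drops it at the end
            simp only [hlt, if_pos] at hm
            have hm' : m = x := by simpa using hm.symm
            subst hm'
            have hxnot : m ∉ ys := fun hin => absurd (PySem.List.max?_isMax hys m hin) (by omega)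
            have herase : (ys ++ [m]).erase m = ys := by
              rw [List.erase_append_right _ hxnot]; simp
            rw [herase]
            -- insertBy puts m before the head of sorted ys (every element of ys has smaller key)
            cases hs : PySem.List.sorted ys key true with
            | nil => simp [PySem.List.insertBy]
            | cons h t =>
                have hhmem : h ∈ ys := by
                  have : h ∈ PySem.List.sorted ys key true := by rw [hs]; simp
                  exact (PySem.List.mem_sorted _ _ _ _).1 this
                have : key h < key m :=
                  lt_of_le_of_lt (PySem.List.max?_isMax hys h hhmem) hlt
                simp [PySem.List.insertBy, this]
          · -- the old max survives; x is appended after it by stability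
            simp only [hlt, if_false] at hm
            have hm' : m = my := by simpa using hm.symm
            subst hm'
            have hmmem : m ∈ ys := PySem.List.max?_mem hys
            have herase : (ys ++ [x]).erase m = ys.erase m ++ [x] :=
              List.erase_append_left _ hmmem
            rw [herase, PySem.List.sorted_rev_eq_foldl_insertBy (ys.erase m ++ [x]),
              List.foldl_append, ← PySem.List.sorted_rev_eq_foldl_insertBy,
              ih hys]
            -- insertBy x (m :: t) keeps m first since ¬ key m < key x
            simp [PySem.List.insertBy, hlt]

-- Source B's loop only appends to its accumulator
theorem pvSelB_append (n : Nat) (pool : List (List Char)) (hn : pool.length ≤ n)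
    (p q : List (List Char)) (budget : Int) :
    pvSelB pool (p ++ q) budget = p ++ pvSelB pool q budget := by
  induction n generalizing pool p q budget with
  | zero =>
      have hnil : pool = [] := List.length_eq_zero_iff.mp (Nat.le_zero.mp hn)
      subst hnil
      rw [pvSelB.eq_def, pvSelB.eq_def]
      simp [PySem.List.max?]
  | succ n ih =>
      rw [pvSelB.eq_def, pvSelB.eq_def]
      cases hm : PySem.List.max? pool (fun s => PySem.Chars.len s) with
      | none => simp only
      | some best =>
          simp only
          have hmem : best ∈ pool := PySem.List.max?_mem hm
          rw [PySem.List.remove?_eq_some_erase pool best hmem]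
          split_ifs with hfit
          · rfl
          · simp only
            rw [show p ++ q ++ [best] = p ++ (q ++ [best]) by simp]
            exact ih (pool.erase best)
              (by have := List.length_erase_of_mem hmem
                  have := List.length_pos_of_mem hmem
                  omega) p (q ++ [best]) _

-- the core correspondence: A's break-loop over the sorted pool = B's selection loop
theorem loopA_eq_selB (n : Nat) (pool : List (List Char)) (hn : pool.length ≤ n)
    (out : List Char) (budget : Int) :
    pvLoopA (PySem.List.sorted pool (fun s => PySem.Chars.len s) true) out budget =
      out ++ (pvSelB pool [] budget).flatten := by
  induction n generalizing pool out budget with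
  | zero =>
      have : pool = [] := List.length_eq_zero_iff.mp (Nat.le_zero.mp hn)
      subst this
      rw [pvSelB.eq_def]
      simp [PySem.List.sorted, pvLoopA, PySem.List.max?]
  | succ n ih =>
      cases hm : PySem.List.max? pool (fun s => PySem.Chars.len s) with
      | none =>
          have : pool = [] := (PySem.List.max?_eq_none_iff _ _).1 hm
          subst this
          rw [pvSelB]
          simp [PySem.List.sorted, pvLoopA, PySem.List.max?]
      | some m =>
          have hmem : m ∈ pool := PySem.List.max?_mem hm
          rw [sorted_rev_eq_max_cons _ _ _ hm]
          rw [pvSelB.eq_def, hm]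
          simp only
          by_cases hfit : budget < PySem.Chars.len m + 2
          · rw [if_pos hfit]
            simp only [pvLoopA]
            rw [if_neg (by omega)]
            simp
          · rw [if_neg hfit]
            rw [PySem.List.remove?_eq_some_erase pool m hmem]
            simp only [pvLoopA]
            rw [if_pos (by omega)]
            have hlen : (pool.erase m).length ≤ n := by
              have := List.length_erase_of_mem hmem
              omega
            rw [show ([] : List (List Char)) ++ [m] = [m] ++ [] by simp,
              pvSelB_append n (pool.erase m) hlen]
            have hih := ih (pool.erase m) hlen (out ++ m) (budget - (PySem.Chars.len m + 2))
            simp only [PySem.Chars.len_eq] at hih ⊢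
            refine hih.trans ?_
            simp

-- join with the empty separator is flatten
theorem join_nil_eq_flatten (l : List (List Char)) :
    PySem.Chars.join [] l = l.flatten := by
  induction l with
  | nil => simp [PySem.Chars.join, List.intercalate]
  | cons x rest ih =>
      cases rest with
      | nil => simp [PySem.Chars.join, List.intercalate]
      | cons y r =>
          rw [PySem.Chars.join_cons_cons] at *
          simp [ih]

-- ===== VERDICT (by name: the statement is the Claim_ definition above) =====
theorem truncate_meta_spec : Claim_equal_truncate_meta := by
  intro text max_length _
  unfold Spec_truncate_meta
  simp only [truncate_meta, truncate_meta_alt]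
  rw [join_nil_eq_flatten,
    loopA_eq_selB (PySem.List.slice (PySem.Chars.splitOn text.toList ['.', ' ']) (some 1) none).length
      _ le_rfl]
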